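-- pv_equiv track=rewrite | github.com/MaxWolf-01/TruthTabler | src/parsing.py | _get_expression_levels
-- ===== SOURCE A (Python) =====
-- def _get_expression_levels(expr):
--     """
--     :returns: dictionary with the level of depth of each part of the expression. Brackets are ignored in the result.
--     e.g.: ['A', 'OR', 'B', 'AND', '(', 'A', 'IF', '(', 'NOT', 'C', 'IF', 'D', ')', ')']
--     => {0: [0, 1, 2, 3], 1: [5, 6], 2: [8, 9, 10, 11]}
--     """
--     level = 0
--     levels = dict()
--     for i, x in enumerate(expr):
--         if x == '(':
--             level += 1
--         elif x == ')':
--             level -= 1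
--         else:
--             levels.setdefault(level, []).append(i)
--     return levels
-- ===== SOURCE B (Python) =====
-- def _get_expression_levels(expr):
--     # Pass 1: depth table — depth[i] = bracket depth of token i (exclusive prefix sum).
--     depth = [0]
--     for x in expr:
--         depth.append(depth[-1] + (x == '(') - (x == ')'))
--     # Pass 2: group indices of non-bracket tokens by their depth.
--     levels = {}
--     for i, (x, lvl) in enumerate(zip(expr, depth)):
--         if x != '(' and x != ')':
--             levels.setdefault(lvl, []).append(i)
--     return levels
-- ===== Notes on version B (the rewrite author's own statement) =====
-- stated objective: alternative
-- what changed: Replaces the single loop that threads a level counter and groups at once with two separate passes: first a standalone depth table built as an exclusive prefix sum over bracket deltas, then a grouping pass over zip(expr, depth).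
import Mathlib
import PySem

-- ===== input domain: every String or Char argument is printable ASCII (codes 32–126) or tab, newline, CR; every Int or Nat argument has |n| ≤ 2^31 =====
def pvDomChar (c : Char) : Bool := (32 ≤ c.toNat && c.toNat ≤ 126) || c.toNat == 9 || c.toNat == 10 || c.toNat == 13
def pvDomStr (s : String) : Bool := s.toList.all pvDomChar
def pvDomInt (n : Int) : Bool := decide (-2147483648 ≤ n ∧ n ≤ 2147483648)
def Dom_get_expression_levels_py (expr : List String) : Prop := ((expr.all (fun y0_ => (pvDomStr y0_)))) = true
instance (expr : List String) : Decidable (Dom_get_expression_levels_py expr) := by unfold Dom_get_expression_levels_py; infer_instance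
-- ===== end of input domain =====

-- B replaces A's single counter-threading loop by two passes (a standalone depth table, then a grouping pass); alternative decomposition, same cost.

-- ===== PORT A =====
-- one loop: thread (level, dict); setdefault(level, []).append(i) = Dict.modify level [] (· ++ [i])
def get_expression_levels_py (expr : List String) : List (Int × List Int) :=
  ((PySem.List.enumerate expr 0).foldl
    (fun (st : Int × PySem.Dict Int (List Int)) p =>
      if p.2 == "(" then (st.1 + 1, st.2)
      else if p.2 == ")" then (st.1 - 1, st.2)
      else (st.1, st.2.modify st.1 [] (· ++ [p.1])))
    (0, PySem.Dict.empty)).2.items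

-- ===== PORT B =====
-- pass 1 of Source B: depth table as exclusive prefix sum (the append loop IS scanl of this step)
def pvStep (lvl : Int) (x : String) : Int :=
  lvl + (if x == "(" then (1 : Int) else 0) - (if x == ")" then (1 : Int) else 0)

def get_expression_levels_py_alt (expr : List String) : List (Int × List Int) :=
  let depth := List.scanl pvStep 0 expr
  ((PySem.List.enumerate (expr.zip depth) 0).foldl
    (fun (d : PySem.Dict Int (List Int)) p =>
      if p.2.1 ≠ "(" ∧ p.2.1 ≠ ")" then d.modify p.2.2 [] (· ++ [p.1]) else d)
    PySem.Dict.empty).items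

-- ===== PRECONDITION & SPEC =====
def Spec_get_expression_levels_py (expr : List String) (out : List (Int × List Int)) : Prop := out = get_expression_levels_py_alt expr
instance (expr : List String) (out : List (Int × List Int)) : Decidable (Spec_get_expression_levels_py expr out) := by unfold Spec_get_expression_levels_py; infer_instance

-- ===== CLAIM (what is proved, stated in full; the proofs are below) =====
def Claim_equal_get_expression_levels_py : Prop := ∀ (expr : List String), Dom_get_expression_levels_py expr → Spec_get_expression_levels_py expr (get_expression_levels_py expr)

-- ===== LEMMAS AND PROOFS =====

-- Core invariant: A's fold from level lvl equals B's grouping fold over expr zipped with scanl from lvl.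
lemma pv_loop_eq (expr : List String) : ∀ (s lvl : Int) (d : PySem.Dict Int (List Int)),
    ((PySem.List.enumerate expr s).foldl
      (fun (st : Int × PySem.Dict Int (List Int)) p =>
        if p.2 == "(" then (st.1 + 1, st.2)
        else if p.2 == ")" then (st.1 - 1, st.2)
        else (st.1, st.2.modify st.1 [] (· ++ [p.1])))
      (lvl, d)).2
    = (PySem.List.enumerate (expr.zip (List.scanl pvStep lvl expr)) s).foldl
        (fun (d : PySem.Dict Int (List Int)) p =>
          if p.2.1 ≠ "(" ∧ p.2.1 ≠ ")" then d.modify p.2.2 [] (· ++ [p.1]) else d)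
        d := by
  induction expr with
  | nil => intro s lvl d; simp [PySem.List.enumerate_nil]
  | cons x xs ih =>
    intro s lvl d
    simp only [List.scanl_cons, List.zip_cons_cons, PySem.List.enumerate_cons, List.foldl_cons]
    by_cases hl : x = "("
    · subst hl
      simpa [pvStep] using ih (s + 1) (lvl + 1) d
    · by_cases hr : x = ")"
      · subst hr
        simpa [pvStep] using ih (s + 1) (lvl - 1) d
      · simp only [beq_iff_eq, hl, hr, if_false, ne_eq, not_false_eq_true, and_self, if_true]
        have hstep : pvStep lvl x = lvl := by simp [pvStep, hl, hr]
        rw [hstep]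
        simpa using ih (s + 1) lvl (d.modify lvl [] (· ++ [s]))

-- ===== VERDICT (by name: the statement is the Claim_ definition above) =====
theorem get_expression_levels_py_spec : Claim_equal_get_expression_levels_py := by
  intro expr _
  unfold Spec_get_expression_levels_py get_expression_levels_py get_expression_levels_py_alt
  rw [pv_loop_eq expr 0 0 PySem.Dict.empty]
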